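-- pv_equiv track=rewrite | github.com/tobe-honest/AlgorithmStudy | seungIl/week6/1447_G4_휴게소.py | solution
-- ===== SOURCE A (Python) =====
-- def check(points, distance, n):
--     cnt = 0
--     for i in range(n + 1):
--         curr_point = points[i]
--         next_point = points[i + 1]
--         while curr_point + distance < next_point:
--             cnt += 1
--             curr_point += distance
--
--     return cnt
--
-- def solution(n, m, l, points):
--     points.sort()
--     points = [0] + [i for i in points]  # 첫단 처리
--     points.append(l)  # 끝단 처리
--     start, end = 1, l
--     result = 0
--     while start <= end:
--         mid = (start + end) // 2
--         if check(points, mid, n) > m: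
--             start = mid + 1
--         else:
--             end = mid - 1
--             result = mid
--
--     return result
-- ===== SOURCE B (Python) =====
-- def solution(n, m, l, points):
--     points.sort()
--     padded = [0] + points + [l]
--     steps = [g - 1 for g in (padded[i + 1] - padded[i] for i in range(n + 1)) if g > 1]
--     d = 1
--     while d <= l:
--         if sum(s // d for s in steps) <= m:
--             return d
--         blocks = [s // (s // d) for s in steps if s >= d]
--         if not blocks:
--             return 0
--         d = min(blocks) + 1
--     return 0
-- ===== Notes on version B (the rewrite author's own statement) =====
-- stated objective: faster
-- what changed: A binary-searches the spacing over [1,l], re-simulating every gap stop by stop inside check; B computes each gap's cut-count in closed form ((g-1)//d) and scans candidate spacings upward, jumping directly between the O(sqrt(gap)) distinct values of the total cut-count until it drops to <= m.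
-- outside the precondition, e.g. on solution(3, 0, 0, []): A returns 0, B raises IndexError
import Mathlib
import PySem

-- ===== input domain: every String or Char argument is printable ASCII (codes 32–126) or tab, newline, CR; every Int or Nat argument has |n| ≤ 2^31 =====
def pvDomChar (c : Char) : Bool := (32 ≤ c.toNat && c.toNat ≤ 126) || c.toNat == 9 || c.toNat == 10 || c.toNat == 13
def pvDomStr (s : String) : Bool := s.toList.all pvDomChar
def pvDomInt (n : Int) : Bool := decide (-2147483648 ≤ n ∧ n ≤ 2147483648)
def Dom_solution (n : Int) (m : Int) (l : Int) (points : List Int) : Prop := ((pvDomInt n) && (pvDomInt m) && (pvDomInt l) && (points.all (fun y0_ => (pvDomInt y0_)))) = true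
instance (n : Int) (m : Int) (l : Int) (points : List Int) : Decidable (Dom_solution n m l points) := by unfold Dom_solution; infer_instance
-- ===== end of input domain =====

-- B replaces A's binary search over the spacing (whose check walks every gap stop by stop) by a
-- single upward scan that jumps between the distinct values of the closed-form cut-count sum
-- (objective: faster; measured). Both A and B sort `points` in place;
-- return-value equivalence is what is proved.


-- ===== PORT A =====
-- inner `while curr_point + distance < next_point` loop of check; fuel (next-curr).toNat dominates
-- the iteration count whenever distance ≥ 1 (the only way A reaches it)
def pvInnerA (distance : Int) : Nat → Int → Int → Int → Int
  | 0, _, _, cnt => cnt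
  | fuel + 1, curr, next, cnt =>
    if curr + distance < next then pvInnerA distance fuel (curr + distance) next (cnt + 1)
    else cnt

-- `check(points, distance, n)`; points[i] via pyGetD (Pre_ keeps the indices in range)
def check (points : List Int) (distance : Int) (n : Int) : Int :=
  (PySem.List.pyRange 0 (n + 1) 1).foldl
    (fun cnt i =>
      let curr := PySem.List.pyGetD points i 0
      let next := PySem.List.pyGetD points (i + 1) 0
      pvInnerA distance (next - curr).toNat curr next cnt)
    0

-- the `while start <= end` binary-search loop; fuel (l+1).toNat dominates the iteration count
def pvSearchA (points : List Int) (n m : Int) : Nat → Int → Int → Int → Int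
  | 0, _, _, result => result
  | fuel + 1, start, stop, result =>
    if start ≤ stop then
      let mid := PySem.Int.floordiv (start + stop) 2
      if check points mid n > m then pvSearchA points n m fuel (mid + 1) stop result
      else pvSearchA points n m fuel start (mid - 1) mid
    else result

def solution (n : Int) (m : Int) (l : Int) (points : List Int) : Int :=
  let pts := PySem.List.sorted points (fun x => x) false
  let padded := (0 :: pts) ++ [l]
  pvSearchA padded n m (l + 1).toNat 1 l 0

-- ===== PORT B =====
-- `while d <= l` jump loop of Source B; fuel (l+1).toNat dominates (d strictly increases)
def pvBlockLoop (steps : List Int) (m l : Int) : Nat → Int → Int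
  | 0, _ => 0
  | fuel + 1, d =>
    if d ≤ l then
      if (steps.map (fun s => PySem.Int.floordiv s d)).sum ≤ m then d
      else
        match PySem.List.min?
            ((steps.filter (fun s => d ≤ s)).map
              (fun s => PySem.Int.floordiv s (PySem.Int.floordiv s d))) (fun x => x) with
        | none => 0
        | some b => pvBlockLoop steps m l fuel (b + 1)
    else 0

def solution_alt (n : Int) (m : Int) (l : Int) (points : List Int) : Int :=
  let pts := PySem.List.sorted points (fun x => x) false
  let padded := (0 :: pts) ++ [l]
  let steps :=
    (((PySem.List.pyRange 0 (n + 1) 1).map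
        (fun i => PySem.List.pyGetD padded (i + 1) 0 - PySem.List.pyGetD padded i 0)).filter
      (fun g => 1 < g)).map (fun g => g - 1)
  pvBlockLoop steps m l (l + 1).toNat 1

-- ===== PRECONDITION & SPEC =====
-- Pre_ excludes n > len(points): there A raises IndexError in check whenever l ≥ 1, and when l < 1 it
-- returns 0 only because the binary-search loop never runs, while B's gap construction indexes the
-- padded list up to n+1 and raises; no other input is excluded.
def Pre_solution (n : Int) (m : Int) (l : Int) (points : List Int) : Prop :=
  n ≤ (points.length : Int)
instance (n : Int) (m : Int) (l : Int) (points : List Int) : Decidable (Pre_solution n m l points) := by unfold Pre_solution; infer_instance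
def pvWitness_solution : Int × Int × Int × List Int := (2, 1, 10, [3, 7])

def Spec_solution (n : Int) (m : Int) (l : Int) (points : List Int) (out : Int) : Prop := out = solution_alt n m l points
instance (n : Int) (m : Int) (l : Int) (points : List Int) (out : Int) : Decidable (Spec_solution n m l points out) := by unfold Spec_solution; infer_instance

-- ===== CLAIM (what is proved, stated in full; the proofs are below) =====
def Claim_equal_solution : Prop := ∀ (n : Int) (m : Int) (l : Int) (points : List Int), Dom_solution n m l points → Pre_solution n m l points → Spec_solution n m l points (solution n m l points)

-- ===== LEMMAS AND PROOFS =====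

-- the list of positive "extra stop" step counts g-1, read off the padded list exactly as B builds it
def stepsList (xs : List Int) (n : Int) : List Int :=
  (((PySem.List.pyRange 0 (n + 1) 1).map
      (fun i => PySem.List.pyGetD xs (i + 1) 0 - PySem.List.pyGetD xs i 0)).filter
    (fun g => 1 < g)).map (fun g => g - 1)

-- closed form of check: total number of added stops at spacing d
def costF (steps : List Int) (d : Int) : Int :=
  (steps.map (fun s => PySem.Int.floordiv s d)).sum

-- what both loops compute: the least feasible spacing in [1,l], or 0 if none
def GoodRes (steps : List Int) (m l R : Int) : Prop :=
  (R = 0 ∧ ∀ d, 1 ≤ d → d ≤ l → ¬ costF steps d ≤ m) ∨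
  (1 ≤ R ∧ R ≤ l ∧ costF steps R ≤ m ∧ ∀ d, 1 ≤ d → d < R → ¬ costF steps d ≤ m)

lemma fd_nonneg (s d : Int) (hs : 0 ≤ s) (hd : 0 < d) : 0 ≤ PySem.Int.floordiv s d := by
  rw [PySem.Int.le_floordiv_iff_mul_le hd]; simpa using hs

lemma fd_self_mul_le (s d : Int) (hd : 0 < d) : PySem.Int.floordiv s d * d ≤ s :=
  (PySem.Int.le_floordiv_iff_mul_le hd).mp le_rfl

lemma fd_antitone (s d d' : Int) (hs : 0 ≤ s) (hd : 0 < d) (hdd : d ≤ d') :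
    PySem.Int.floordiv s d' ≤ PySem.Int.floordiv s d := by
  have hd' : 0 < d' := by omega
  rw [PySem.Int.le_floordiv_iff_mul_le hd]
  have h1 := fd_self_mul_le s d' hd'
  have h0 : 0 ≤ PySem.Int.floordiv s d' := fd_nonneg s d' hs hd'
  nlinarith

lemma fd_eq_zero (s d : Int) (hs : 0 ≤ s) (hsd : s < d) : PySem.Int.floordiv s d = 0 := by
  have hd : 0 < d := by omega
  rw [PySem.Int.floordiv_eq_iff_of_pos hd]; omega

lemma fd_pos_of_le (s d : Int) (hd : 0 < d) (hds : d ≤ s) : 1 ≤ PySem.Int.floordiv s d := by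
  rw [PySem.Int.le_floordiv_iff_mul_le hd]; omega

lemma fd_block_ge (s d : Int) (hd : 0 < d) (hds : d ≤ s) :
    d ≤ PySem.Int.floordiv s (PySem.Int.floordiv s d) := by
  have hq : 1 ≤ PySem.Int.floordiv s d := fd_pos_of_le s d hd hds
  rw [PySem.Int.le_floordiv_iff_mul_le (by omega : (0:Int) < PySem.Int.floordiv s d)]
  have h1 := fd_self_mul_le s d hd
  nlinarith

lemma fd_block (s d d' : Int) (hd : 0 < d) (hds : d ≤ s) (hdd : d ≤ d')
    (hup : d' ≤ PySem.Int.floordiv s (PySem.Int.floordiv s d)) :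
    PySem.Int.floordiv s d' = PySem.Int.floordiv s d := by
  have hq : 1 ≤ PySem.Int.floordiv s d := fd_pos_of_le s d hd hds
  refine le_antisymm (fd_antitone s d d' (by omega) hd hdd) ?_
  rw [PySem.Int.le_floordiv_iff_mul_le (by omega : (0:Int) < d')]
  have h1 : d' * PySem.Int.floordiv s d ≤ s := by
    have h2 := fd_self_mul_le s (PySem.Int.floordiv s d) (by omega)
    nlinarith
  nlinarith

lemma stepsList_pos (xs : List Int) (n : Int) : ∀ s ∈ stepsList xs n, 1 ≤ s := by
  intro s hs
  simp only [stepsList, List.mem_map, List.mem_filter, decide_eq_true_eq] at hs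
  obtain ⟨g, ⟨_, hg⟩, rfl⟩ := hs
  omega

lemma costF_antitone (steps : List Int) (d d' : Int) (hst : ∀ s ∈ steps, 1 ≤ s)
    (hd : 0 < d) (hdd : d ≤ d') : costF steps d' ≤ costF steps d := by
  induction steps with
  | nil => simp [costF]
  | cons a t ih =>
    simp only [costF, List.map_cons, List.sum_cons]
    have ha := hst a (by simp)
    exact add_le_add (fd_antitone a d d' (by omega) hd hdd)
      (ih (fun s hs => hst s (by simp [hs])))

lemma costF_block (steps : List Int) (d d' : Int) (hst : ∀ s ∈ steps, 1 ≤ s)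
    (hd : 0 < d) (hdd : d ≤ d')
    (hup : ∀ s ∈ steps, d ≤ s → d' ≤ PySem.Int.floordiv s (PySem.Int.floordiv s d)) :
    costF steps d' = costF steps d := by
  induction steps with
  | nil => simp [costF]
  | cons a t ih =>
    simp only [costF, List.map_cons, List.sum_cons]
    have ha := hst a (by simp)
    have hhead : PySem.Int.floordiv a d' = PySem.Int.floordiv a d := by
      by_cases hda : d ≤ a
      · exact fd_block a d d' hd hda hdd (hup a (by simp) hda)
      · rw [fd_eq_zero a d (by omega) (by omega), fd_eq_zero a d' (by omega) (by omega)]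
    rw [hhead]
    have := ih (fun s hs => hst s (by simp [hs])) (fun s hs h => hup s (by simp [hs]) h)
    simp only [costF] at this
    omega

lemma innerA_eq (distance : Int) (hd : 1 ≤ distance) :
    ∀ (fuel : Nat) (curr next cnt : Int), (next - curr).toNat ≤ fuel →
    pvInnerA distance fuel curr next cnt
      = cnt + (if 1 < next - curr then PySem.Int.floordiv (next - curr - 1) distance else 0) := by
  intro fuel
  induction fuel with
  | zero =>
    intro curr next cnt hfuel
    simp only [pvInnerA]
    rw [if_neg (by omega)]
    omega
  | succ f ih =>
    intro curr next cnt hfuel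
    simp only [pvInnerA]
    by_cases h : curr + distance < next
    · rw [if_pos h, ih (curr + distance) next (cnt + 1) (by omega)]
      by_cases h2 : 1 < next - (curr + distance)
      · rw [if_pos h2, if_pos (by omega)]
        have he : next - curr - 1 = (next - (curr + distance) - 1) + 1 * distance := by ring
        rw [he, PySem.Int.floordiv_eq_ediv_of_pos (by omega),
          PySem.Int.floordiv_eq_ediv_of_pos (by omega),
          Int.add_mul_ediv_right _ _ (by omega : distance ≠ 0)]
        omega
      · rw [if_neg h2, if_pos (by omega)]
        have hg : next - curr - 1 = distance := by omega
        have h3 : PySem.Int.floordiv distance distance = 1 := by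
          rw [PySem.Int.floordiv_eq_iff_of_pos (by omega)]; omega
        rw [hg, h3]; omega
    · rw [if_neg h]
      by_cases h2 : 1 < next - curr
      · rw [if_pos h2, fd_eq_zero _ _ (by omega) (by omega)]
        omega
      · rw [if_neg h2]; omega

lemma sum_filter_map_eq (L : List Int) (f : Int → Int) :
    ((L.filter (fun g => decide (1 < g))).map f).sum
      = (L.map (fun g => if 1 < g then f g else 0)).sum := by
  induction L with
  | nil => simp
  | cons a t ih =>
    simp only [List.filter_cons, List.map_cons, List.sum_cons]
    by_cases h : 1 < a
    · simp [h, ih]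
    · simp [h, ih]

lemma check_eq (xs : List Int) (d n : Int) (hd : 1 ≤ d) :
    check xs d n = costF (stepsList xs n) d := by
  have hfun : (fun (cnt i : Int) =>
      let curr := PySem.List.pyGetD xs i 0
      let next := PySem.List.pyGetD xs (i + 1) 0
      pvInnerA d (next - curr).toNat curr next cnt)
    = (fun (cnt i : Int) => cnt +
        (if 1 < PySem.List.pyGetD xs (i + 1) 0 - PySem.List.pyGetD xs i 0
         then PySem.Int.floordiv (PySem.List.pyGetD xs (i + 1) 0 - PySem.List.pyGetD xs i 0 - 1) d
         else 0)) := by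
    funext cnt i
    exact innerA_eq d hd _ _ _ _ le_rfl
  rw [check, hfun, PySem.List.foldl_add]
  rw [costF, stepsList, List.map_map, sum_filter_map_eq, List.map_map]
  simp only [Function.comp_def]
  omega

lemma sum_map_zero_of (steps : List Int) (f : Int → Int) (h : ∀ s ∈ steps, f s = 0) :
    (steps.map f).sum = 0 := by
  induction steps with
  | nil => simp
  | cons a t ih =>
    simp only [List.map_cons, List.sum_cons, h a (by simp), ih (fun s hs => h s (by simp [hs]))]
    omega

lemma searchA_good (xs : List Int) (n m l : Int) :
    ∀ (fuel : Nat) (s e r : Int), (e + 1 - s).toNat < fuel → 1 ≤ s → e ≤ l →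
    (∀ d, 1 ≤ d → d < s → ¬ costF (stepsList xs n) d ≤ m) →
    ((r = 0 ∧ e = l) ∨ (r = e + 1 ∧ 1 ≤ r ∧ r ≤ l ∧ costF (stepsList xs n) r ≤ m)) →
    GoodRes (stepsList xs n) m l (pvSearchA xs n m fuel s e r) := by
  intro fuel
  induction fuel with
  | zero => intro s e r hfuel; omega
  | succ f ih =>
    intro s e r hfuel hs hel hlow hr
    simp only [pvSearchA]
    by_cases hse : s ≤ e
    · rw [if_pos hse]
      have hmid := PySem.Int.floordiv_two_mid_bounds hse
      rw [check_eq xs _ n (by omega)]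
      by_cases hc : costF (stepsList xs n) (PySem.Int.floordiv (s + e) 2) > m
      · rw [if_pos hc]
        refine ih _ e r (by omega) (by omega) hel ?_ hr
        intro d hd1 hd2
        by_cases hds : d < s
        · exact hlow d hd1 hds
        · intro hfeas
          have := costF_antitone (stepsList xs n) d (PySem.Int.floordiv (s + e) 2)
            (stepsList_pos xs n) (by omega) (by omega)
          omega
      · rw [if_neg hc]
        refine ih s _ _ (by omega) hs (by omega) hlow ?_
        right
        exact ⟨by omega, by omega, by omega, by omega⟩
    · rw [if_neg hse]
      rcases hr with ⟨h0, he⟩ | ⟨hre, h1, hl2, hf⟩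
      · exact Or.inl ⟨h0, fun d hd1 hd2 => hlow d hd1 (by omega)⟩
      · exact Or.inr ⟨h1, hl2, hf, fun d hd1 hd2 => hlow d hd1 (by omega)⟩

lemma bloop_good (steps : List Int) (m l : Int) (hst : ∀ s ∈ steps, 1 ≤ s) :
    ∀ (fuel : Nat) (d : Int), (l + 1 - d).toNat < fuel → 1 ≤ d →
    (∀ d', 1 ≤ d' → d' < d → ¬ costF steps d' ≤ m) →
    GoodRes steps m l (pvBlockLoop steps m l fuel d) := by
  intro fuel
  induction fuel with
  | zero => intro d hfuel; omega
  | succ f ih =>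
    intro d hfuel hd1 hlow
    simp only [pvBlockLoop]
    by_cases hdl : d ≤ l
    · rw [if_pos hdl]
      have hcost : (steps.map (fun s => PySem.Int.floordiv s d)).sum = costF steps d := rfl
      rw [hcost]
      by_cases hf : costF steps d ≤ m
      · rw [if_pos hf]
        exact Or.inr ⟨hd1, hdl, hf, hlow⟩
      · rw [if_neg hf]
        rcases hmin : PySem.List.min?
            ((steps.filter (fun s => d ≤ s)).map
              (fun s => PySem.Int.floordiv s (PySem.Int.floordiv s d))) (fun x => x) with _ | b
        · show GoodRes steps m l 0
          have hempty : (steps.filter (fun s => decide (d ≤ s))) = [] := by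
            have := (PySem.List.min?_eq_none_iff _ _).mp hmin
            exact List.map_eq_nil_iff.mp this
          have hsmall : ∀ s ∈ steps, s < d := by
            intro s hs
            by_contra hcon
            have : s ∈ steps.filter (fun s => decide (d ≤ s)) := by
              rw [List.mem_filter]
              exact ⟨hs, by simpa using by omega⟩
            rw [hempty] at this
            simp at this
          have hzero : ∀ d'', d ≤ d'' → costF steps d'' = 0 := by
            intro d'' hdd
            apply sum_map_zero_of
            intro s hs
            exact fd_eq_zero s d'' (by linarith [hst s hs]) (by linarith [hsmall s hs])
          refine Or.inl ⟨rfl, ?_⟩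
          intro d'' h1 h2
          by_cases hlt : d'' < d
          · exact hlow d'' h1 hlt
          · rw [hzero d'' (by omega)]
            rw [hzero d le_rfl] at hf
            omega
        · show GoodRes steps m l (pvBlockLoop steps m l f (b + 1))
          have hbmem := PySem.List.min?_mem hmin
          have hbmin := PySem.List.min?_isMin hmin
          simp only [List.mem_map, List.mem_filter, decide_eq_true_eq] at hbmem
          obtain ⟨s0, ⟨hs0, hds0⟩, hb⟩ := hbmem
          have hbd : d ≤ b := hb ▸ fd_block_ge s0 d (by omega) hds0
          refine ih (b + 1) (by omega) (by omega) ?_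
          intro d'' h1 h2
          by_cases hlt : d'' < d
          · exact hlow d'' h1 hlt
          · have hblk : costF steps d'' = costF steps d := by
              apply costF_block steps d d'' hst (by omega) (by omega)
              intro s hs hds
              have hmem : PySem.Int.floordiv s (PySem.Int.floordiv s d)
                  ∈ (steps.filter (fun s => d ≤ s)).map
                    (fun s => PySem.Int.floordiv s (PySem.Int.floordiv s d)) := by
                simp only [List.mem_map, List.mem_filter, decide_eq_true_eq]
                exact ⟨s, ⟨hs, hds⟩, rfl⟩
              have := hbmin _ hmem
              simp only at this
              omega
            rw [hblk]
            exact hf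
    · rw [if_neg hdl]
      exact Or.inl ⟨rfl, fun d'' h1 h2 => hlow d'' h1 (by omega)⟩

lemma GoodRes_unique (steps : List Int) (m l R1 R2 : Int)
    (h1 : GoodRes steps m l R1) (h2 : GoodRes steps m l R2) : R1 = R2 := by
  rcases h1 with ⟨e1, n1⟩ | ⟨a1, b1, c1, d1⟩ <;> rcases h2 with ⟨e2, n2⟩ | ⟨a2, b2, c2, d2⟩
  · omega
  · exact absurd c2 (n1 R2 a2 b2)
  · exact absurd c1 (n2 R1 a1 b1)
  · rcases lt_trichotomy R1 R2 with h | h | h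
    · exact absurd c1 (d2 R1 a1 h)
    · exact h
    · exact absurd c2 (d1 R2 a2 h)

lemma solution_good (n m l : Int) (points : List Int) :
    GoodRes (stepsList ((0 :: PySem.List.sorted points (fun x => x) false) ++ [l]) n) m l
      (solution n m l points) := by
  by_cases hl : 0 ≤ l
  · exact searchA_good _ n m l (l + 1).toNat 1 l 0
      (by omega) le_rfl le_rfl (fun d h1 h2 => absurd h1 (by omega)) (Or.inl ⟨rfl, rfl⟩)
  · have h0 : (l + 1).toNat = 0 := by omega
    show GoodRes _ m l (pvSearchA _ n m (l + 1).toNat 1 l 0)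
    rw [h0]
    exact Or.inl ⟨rfl, fun d h1 h2 => absurd h2 (by omega)⟩

lemma solution_alt_good (n m l : Int) (points : List Int) :
    GoodRes (stepsList ((0 :: PySem.List.sorted points (fun x => x) false) ++ [l]) n) m l
      (solution_alt n m l points) := by
  by_cases hl : 0 ≤ l
  · exact bloop_good _ m l (stepsList_pos _ n) (l + 1).toNat 1
      (by omega) le_rfl (fun d h1 h2 => absurd h1 (by omega))
  · have h0 : (l + 1).toNat = 0 := by omega
    show GoodRes _ m l (pvBlockLoop _ m l (l + 1).toNat 1)
    rw [h0]
    exact Or.inl ⟨rfl, fun d h1 h2 => absurd h2 (by omega)⟩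

-- ===== VERDICT (by name: the statement is the Claim_ definition above) =====
theorem solution_spec : Claim_equal_solution := by
  intro n m l points _ _
  show solution n m l points = solution_alt n m l points
  exact GoodRes_unique _ m l _ _ (solution_good n m l points) (solution_alt_good n m l points)
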